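-- pv_equiv track=rewrite | github.com/Santos-Jefferson/contentFilteringPoc | main.py | _group_scene_categories
-- ===== SOURCE A (Python) =====
-- def _scene_group_name(category: str) -> str:
--     if category.startswith("violence_"):
--         return "Violence"
--     lowered = category.lower()
--     if any(token in lowered for token in ("nudity", "sex", "immodesty", "kissing")):
--         return "Sex and Nudity"
--     return "Other Scenes"
--
-- def _group_scene_categories(scene_categories: list[str]) -> dict[str, list[str]]:
--     grouped: dict[str, list[str]] = {
--         "Violence": [],
--         "Sex and Nudity": [],
--         "Other Scenes": [],
--     }
--     for name in sorted(scene_categories):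
--         grouped[_scene_group_name(name)].append(name)
--     return grouped
-- ===== SOURCE B (Python) =====
-- def _rank(category: str) -> int:
--     if category.startswith("violence_"):
--         return 0
--     lowered = category.lower()
--     if any(token in lowered for token in ("nudity", "sex", "immodesty", "kissing")):
--         return 1
--     return 2
--
-- def _group_scene_categories(scene_categories: list[str]) -> dict[str, list[str]]:
--     ranked = sorted(scene_categories, key=lambda name: (_rank(name), name))
--     n0 = 0
--     n1 = 0
--     for name in ranked:
--         r = _rank(name)
--         if r == 0:
--             n0 += 1
--         elif r == 1:
--             n1 += 1
--     return {
--         "Violence": ranked[:n0],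
--         "Sex and Nudity": ranked[n0:n0 + n1],
--         "Other Scenes": ranked[n0 + n1:],
--     }
-- ===== Notes on version B (the rewrite author's own statement) =====
-- stated objective: alternative
-- what changed: B performs ONE sort of the whole list by the composite key (rank, name) where rank 0/1/2 encodes the bucket, counts the ranks, and slices the sorted list into the three buckets, instead of A's sort-by-name followed by per-element dict-dispatch appends into bucket lists.
import Mathlib
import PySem

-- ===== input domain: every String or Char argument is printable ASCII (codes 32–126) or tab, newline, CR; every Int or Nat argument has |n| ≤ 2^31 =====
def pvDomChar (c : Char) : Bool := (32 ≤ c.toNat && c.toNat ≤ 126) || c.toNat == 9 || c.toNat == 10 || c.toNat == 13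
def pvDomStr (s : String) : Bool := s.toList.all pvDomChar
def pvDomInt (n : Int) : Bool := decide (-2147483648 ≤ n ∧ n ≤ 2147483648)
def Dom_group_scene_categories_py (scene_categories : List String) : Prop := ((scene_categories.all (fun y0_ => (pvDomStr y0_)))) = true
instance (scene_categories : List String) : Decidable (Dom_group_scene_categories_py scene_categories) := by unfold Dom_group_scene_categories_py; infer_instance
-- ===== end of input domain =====

-- B replaces A's sort-by-name + per-element dict-dispatch appends by ONE sort on the
-- composite key (rank, name), a rank-counting pass and three slices (objective: alternative).

-- ===== PORT A =====
-- helper _scene_group_name from Source A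
def sceneGroupName (category : String) : String :=
  if PySem.Str.startswith category "violence_" then "Violence"
  else
    let lowered := PySem.Str.lower category
    if ["nudity", "sex", "immodesty", "kissing"].any (fun token => PySem.Str.isIn token lowered)
    then "Sex and Nudity"
    else "Other Scenes"

def group_scene_categories_py (scene_categories : List String) : List (String × List String) :=
  let grouped : PySem.Dict String (List String) :=
    PySem.Dict.mk [("Violence", []), ("Sex and Nudity", []), ("Other Scenes", [])]
  ((PySem.List.sorted scene_categories (fun x => x) false).foldl
    (fun d name => d.modify (sceneGroupName name) [] (fun l => l ++ [name])) grouped).items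

-- ===== PORT B =====
-- helper _rank from Source B
def rankOf (category : String) : Int :=
  if PySem.Str.startswith category "violence_" then 0
  else
    let lowered := PySem.Str.lower category
    if ["nudity", "sex", "immodesty", "kissing"].any (fun token => PySem.Str.isIn token lowered)
    then 1
    else 2

def group_scene_categories_py_alt (scene_categories : List String) : List (String × List String) :=
  let ranked := PySem.List.sorted2 scene_categories rankOf (fun name => name) false
  let counts := ranked.foldl
    (fun (c : Int × Int) name =>
      let r := rankOf name
      if r = 0 then (c.1 + 1, c.2)
      else if r = 1 then (c.1, c.2 + 1)
      else c) (0, 0)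
  let n0 := counts.1
  let n1 := counts.2
  [("Violence", PySem.List.slice ranked none (some n0)),
   ("Sex and Nudity", PySem.List.slice ranked (some n0) (some (n0 + n1))),
   ("Other Scenes", PySem.List.slice ranked (some (n0 + n1)) none)]

-- ===== PRECONDITION & SPEC =====
def Spec_group_scene_categories_py (scene_categories : List String) (out : List (String × List String)) : Prop := out = group_scene_categories_py_alt scene_categories
instance (scene_categories : List String) (out : List (String × List String)) : Decidable (Spec_group_scene_categories_py scene_categories out) := by unfold Spec_group_scene_categories_py; infer_instance

-- ===== CLAIM (what is proved, stated in full; the proofs are below) =====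
def Claim_equal_group_scene_categories_py : Prop := ∀ (scene_categories : List String), Dom_group_scene_categories_py scene_categories → Spec_group_scene_categories_py scene_categories (group_scene_categories_py scene_categories)

-- ===== LEMMAS AND PROOFS =====

theorem rank_cases (n : String) : rankOf n = 0 ∨ rankOf n = 1 ∨ rankOf n = 2 := by
  simp only [rankOf]; split
  · left; rfl
  · split
    · right; left; rfl
    · right; right; rfl

-- the two helpers classify identically (same tests, same order)
theorem group_rank_0 (n : String) : (sceneGroupName n = "Violence") ↔ rankOf n = 0 := by
  simp only [sceneGroupName, rankOf]; split_ifs <;> simp_all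
theorem group_rank_1 (n : String) : (sceneGroupName n = "Sex and Nudity") ↔ rankOf n = 1 := by
  simp only [sceneGroupName, rankOf]; split_ifs <;> simp_all
theorem group_rank_2 (n : String) : (sceneGroupName n = "Other Scenes") ↔ rankOf n = 2 := by
  simp only [sceneGroupName, rankOf]; split_ifs <;> simp_all

theorem sceneGroupName_cases (n : String) :
    sceneGroupName n = "Violence" ∨ sceneGroupName n = "Sex and Nudity" ∨
    sceneGroupName n = "Other Scenes" := by
  simp only [sceneGroupName]
  split
  · left; rfl
  · split
    · right; left; rfl
    · right; right; rfl

-- one step of A's loop: grouped[_scene_group_name(y)].append(y) on the three-key dict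
theorem modify_step (y : String) (a b c : List String) :
    PySem.Dict.modify
      (PySem.Dict.mk [("Violence", a), ("Sex and Nudity", b), ("Other Scenes", c)])
      (sceneGroupName y) [] (fun l => l ++ [y]) =
    PySem.Dict.mk
      [("Violence", if sceneGroupName y == "Violence" then a ++ [y] else a),
       ("Sex and Nudity", if sceneGroupName y == "Sex and Nudity" then b ++ [y] else b),
       ("Other Scenes", if sceneGroupName y == "Other Scenes" then c ++ [y] else c)] := by
  rcases sceneGroupName_cases y with h | h | h <;>
    simp [PySem.Dict.modify, PySem.Dict.insert, PySem.Dict.getD, PySem.Dict.get?,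
      PySem.Dict.contains, h]

-- A's fold over any list, starting from the three-key dict with arbitrary values
theorem foldA_eq (ys : List String) (a b c : List String) :
    ys.foldl (fun d name => PySem.Dict.modify d (sceneGroupName name) [] (fun l => l ++ [name]))
      (PySem.Dict.mk [("Violence", a), ("Sex and Nudity", b), ("Other Scenes", c)]) =
    PySem.Dict.mk [("Violence", a ++ ys.filter (fun n => sceneGroupName n == "Violence")),
     ("Sex and Nudity", b ++ ys.filter (fun n => sceneGroupName n == "Sex and Nudity")),
     ("Other Scenes", c ++ ys.filter (fun n => sceneGroupName n == "Other Scenes"))] := by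
  induction ys generalizing a b c with
  | nil => simp
  | cons y t ih =>
    rw [List.foldl_cons, modify_step]
    rcases sceneGroupName_cases y with h | h | h <;>
      simp [h, ih]

-- filtering a sorted list = sorting the filtered list
theorem filter_sorted_eq (p : String → Bool) (xs : List String) :
    (PySem.List.sorted xs (fun x => x) false).filter p =
    PySem.List.sorted (xs.filter p) (fun x => x) false := by
  have hperm : (List.filter p (PySem.List.sorted xs (fun x => x) false)).Perm (List.filter p xs) :=
    (PySem.List.sorted_perm xs (fun x => x) false).filter p
  have hpw : (List.filter p (PySem.List.sorted xs (fun x => x) false)).Pairwise (fun a b => a ≤ b) :=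
    (PySem.List.sorted_pairwise xs (fun x => x)).sublist List.filter_sublist
  exact (PySem.List.sorted_id_eq_of_perm_of_pairwise _ _ hperm hpw).symm

-- the (rank, name) lexicographic order B sorts by
def lexR (a b : String) : Prop := rankOf a < rankOf b ∨ (rankOf a = rankOf b ∧ a ≤ b)

theorem lexR_trans : ∀ {a b c : String}, lexR a b → lexR b c → lexR a c := by
  rintro a b c (h | ⟨h, h'⟩) (g | ⟨g, g'⟩)
  · exact Or.inl (h.trans g)
  · exact Or.inl (g ▸ h)
  · exact Or.inl (h ▸ g)
  · exact Or.inr ⟨h.trans g, h'.trans g'⟩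

theorem lexR_antisymm : ∀ {a b : String}, lexR a b → lexR b a → a = b := by
  rintro a b (h | ⟨h, h'⟩) (g | ⟨g, g'⟩)
  · omega
  · omega
  · omega
  · exact le_antisymm h' g'

-- the Bool comparison sorted2 uses on key (rankOf, id), and its relation to lexR
def lt2 (a b : String) : Bool :=
  decide (rankOf a < rankOf b) || (!decide (rankOf b < rankOf a) && decide (a < b))

theorem lexR_of_lt2 {a b : String} (h : lt2 a b = true) : lexR a b := by
  simp only [lt2, Bool.or_eq_true, Bool.and_eq_true, Bool.not_eq_true', decide_eq_true_eq,
    decide_eq_false_iff_not] at h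
  rcases h with h | ⟨h, h'⟩
  · exact Or.inl h
  · rcases (not_lt.mp h).lt_or_eq with hlt | heq
    · exact Or.inl hlt
    · exact Or.inr ⟨heq, h'.le⟩

theorem lexR_of_not_lt2 {a b : String} (h : lt2 a b = false) : lexR b a := by
  simp only [lt2, Bool.or_eq_false_iff, Bool.and_eq_false_iff, Bool.not_eq_false',
    decide_eq_true_eq, decide_eq_false_iff_not] at h
  obtain ⟨h1, h2⟩ := h
  rcases h2 with h2 | h2
  · exact Or.inl h2
  · rcases (not_lt.mp h1).lt_or_eq with hlt | heq
    · exact Or.inl hlt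
    · exact Or.inr ⟨heq, not_lt.mp h2⟩

theorem insertBy_lt2_pairwise {x : String} {ys : List String}
    (h : ys.Pairwise lexR) : (PySem.List.insertBy lt2 x ys).Pairwise lexR := by
  induction ys with
  | nil => simp [PySem.List.insertBy]
  | cons y t ih =>
    rw [PySem.List.insertBy]
    rcases List.pairwise_cons.mp h with ⟨hy, ht⟩
    by_cases hlt : lt2 x y = true
    · simp only [hlt, if_pos]
      refine List.pairwise_cons.mpr ⟨?_, h⟩
      intro z hz
      rcases hz with _ | hz
      · exact lexR_of_lt2 hlt
      · exact lexR_trans (lexR_of_lt2 hlt) (hy _ (by assumption))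
    · rw [if_neg hlt]
      refine List.pairwise_cons.mpr ⟨?_, ih ht⟩
      intro z hz
      rcases (PySem.List.mem_insertBy _ _ _ _).mp hz with rfl | hz
      · exact lexR_of_not_lt2 (Bool.eq_false_iff.mpr hlt)
      · exact hy _ hz

theorem foldl_insertBy_pairwise (l : List String) (acc : List String)
    (h : acc.Pairwise lexR) :
    (l.foldl (fun acc x => PySem.List.insertBy lt2 x acc) acc).Pairwise lexR := by
  induction l generalizing acc with
  | nil => exact h
  | cons x t ih => exact ih _ (insertBy_lt2_pairwise h)

theorem sorted2_pairwise_lexR (xs : List String) :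
    (PySem.List.sorted2 xs rankOf (fun name => name) false).Pairwise lexR :=
  foldl_insertBy_pairwise xs [] (by simp)

-- bucket predicates
def p0 (n : String) : Bool := rankOf n == 0
def p1 (n : String) : Bool := rankOf n == 1
def p2 (n : String) : Bool := rankOf n == 2

-- sorted bucket
def bucket (p : String → Bool) (xs : List String) : List String :=
  PySem.List.sorted (xs.filter p) (fun x => x) false

theorem mem_bucket_rank {p : String → Bool} {k : Int}
    (hp : ∀ n, p n = true → rankOf n = k) {xs : List String} :
    ∀ z ∈ bucket p xs, rankOf z = k := by
  intro z hz
  have : z ∈ xs.filter p := (PySem.List.mem_sorted _ _ _ _).mp hz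
  exact hp z (List.of_mem_filter this)

theorem perm_buckets (xs : List String) :
    (bucket p0 xs ++ bucket p1 xs ++ bucket p2 xs).Perm xs := by
  rw [List.append_assoc]
  have h0 : (bucket p0 xs).Perm (xs.filter p0) := PySem.List.sorted_perm _ _ _
  have h1 : (bucket p1 xs).Perm (xs.filter p1) := PySem.List.sorted_perm _ _ _
  have h2 : (bucket p2 xs).Perm (xs.filter p2) := PySem.List.sorted_perm _ _ _
  refine ((h0.append (h1.append h2)).trans ?_)
  have hsplit1 : (xs.filter (fun n => !p0 n)).filter p1 = xs.filter p1 := by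
    rw [List.filter_filter]
    apply List.filter_congr
    intro n _
    rcases rank_cases n with h | h | h <;> simp [p0, p1, h]
  have hsplit2 : (xs.filter (fun n => !p0 n)).filter (fun n => !p1 n) = xs.filter p2 := by
    rw [List.filter_filter]
    apply List.filter_congr
    intro n _
    rcases rank_cases n with h | h | h <;> simp [p0, p1, p2, h]
  have hp1 : (xs.filter p1 ++ xs.filter p2).Perm (xs.filter (fun n => !p0 n)) := by
    rw [← hsplit1, ← hsplit2]
    exact List.filter_append_perm p1 _
  refine (List.Perm.append (List.Perm.refl _) hp1).trans ?_
  exact List.filter_append_perm p0 xs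

theorem bucket_pairwise {p : String → Bool} {k : Int}
    (hp : ∀ n, p n = true → rankOf n = k) (xs : List String) :
    (bucket p xs).Pairwise lexR := by
  refine (PySem.List.sorted_pairwise (xs.filter p) (fun x => x)).imp_of_mem ?_
  intro a b ha hb hle
  exact Or.inr ⟨(mem_bucket_rank hp a ha).trans (mem_bucket_rank hp b hb).symm, hle⟩

theorem hp0 : ∀ n, p0 n = true → rankOf n = 0 := fun n h => by simpa [p0] using h
theorem hp1 : ∀ n, p1 n = true → rankOf n = 1 := fun n h => by simpa [p1] using h
theorem hp2 : ∀ n, p2 n = true → rankOf n = 2 := fun n h => by simpa [p2] using h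

theorem pairwise_buckets (xs : List String) :
    (bucket p0 xs ++ bucket p1 xs ++ bucket p2 xs).Pairwise lexR := by
  refine List.pairwise_append.mpr ⟨List.pairwise_append.mpr
    ⟨bucket_pairwise hp0 xs, bucket_pairwise hp1 xs, ?_⟩, bucket_pairwise hp2 xs, ?_⟩
  · intro a ha b hb
    exact Or.inl (by rw [mem_bucket_rank hp0 a ha, mem_bucket_rank hp1 b hb]; norm_num)
  · intro a ha b hb
    rcases List.mem_append.mp ha with ha | ha
    · exact Or.inl (by rw [mem_bucket_rank hp0 a ha, mem_bucket_rank hp2 b hb]; norm_num)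
    · exact Or.inl (by rw [mem_bucket_rank hp1 a ha, mem_bucket_rank hp2 b hb]; norm_num)

-- B's sort: ONE composite-key sort = the three sorted buckets in rank order
theorem ranked_eq (xs : List String) :
    PySem.List.sorted2 xs rankOf (fun name => name) false =
      bucket p0 xs ++ bucket p1 xs ++ bucket p2 xs := by
  exact List.Perm.eq_of_pairwise (fun _ _ _ _ => lexR_antisymm)
    (sorted2_pairwise_lexR xs) (pairwise_buckets xs)
    ((PySem.List.sorted2_perm xs rankOf (fun name => name) false).trans
      (perm_buckets xs).symm)

-- B's counting loop
theorem counts_eq (l : List String) (a b : Int) :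
    l.foldl (fun (c : Int × Int) name =>
      let r := rankOf name
      if r = 0 then (c.1 + 1, c.2)
      else if r = 1 then (c.1, c.2 + 1)
      else c) (a, b) = (a + (l.countP p0 : Int), b + (l.countP p1 : Int)) := by
  induction l generalizing a b with
  | nil => simp
  | cons x t ih =>
    rcases rank_cases x with h | h | h <;>
      simp only [List.foldl_cons, List.countP_cons, h, p0, p1] <;> simp [ih] <;> push_cast <;> ring


theorem filterA_eq_bucket0 (xs : List String) :
    (PySem.List.sorted xs (fun x => x) false).filter (fun n => sceneGroupName n == "Violence") =
      bucket p0 xs := by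
  rw [filter_sorted_eq, bucket]
  congr 1
  apply List.filter_congr
  intro n _
  simp [p0, group_rank_0]

theorem filterA_eq_bucket1 (xs : List String) :
    (PySem.List.sorted xs (fun x => x) false).filter (fun n => sceneGroupName n == "Sex and Nudity") =
      bucket p1 xs := by
  rw [filter_sorted_eq, bucket]
  congr 1
  apply List.filter_congr
  intro n _
  simp [p1, group_rank_1]

theorem filterA_eq_bucket2 (xs : List String) :
    (PySem.List.sorted xs (fun x => x) false).filter (fun n => sceneGroupName n == "Other Scenes") =
      bucket p2 xs := by
  rw [filter_sorted_eq, bucket]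
  congr 1
  apply List.filter_congr
  intro n _
  simp [p2, group_rank_2]

theorem hp0' : ∀ z : String, rankOf z = 0 → p0 z = true := fun z h => by simp [p0, h]
theorem hp1' : ∀ z : String, rankOf z = 1 → p1 z = true := fun z h => by simp [p1, h]

theorem slice3_1 (a b c : List String) :
    PySem.List.slice (a ++ b ++ c) none (some (a.length : Int)) = a := by
  rw [PySem.List.slice_to_natCast, List.append_assoc, List.take_left' rfl]

theorem slice3_2 (a b c : List String) :
    PySem.List.slice (a ++ b ++ c) (some (a.length : Int))
      (some ((a.length : Int) + (b.length : Int))) = b := by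
  rw [PySem.List.slice_natCast_add, List.append_assoc, List.drop_left' rfl, List.take_left' rfl]

theorem slice3_3 (a b c : List String) :
    PySem.List.slice (a ++ b ++ c) (some ((a.length : Int) + (b.length : Int))) none = c := by
  rw [← Nat.cast_add, PySem.List.slice_from_natCast, List.drop_left' (by simp)]

theorem main_eq (xs : List String) :
    group_scene_categories_py xs = group_scene_categories_py_alt xs := by
  unfold group_scene_categories_py group_scene_categories_py_alt
  dsimp only
  rw [foldA_eq, counts_eq, ranked_eq]
  simp only [List.nil_append, zero_add,
    filterA_eq_bucket0, filterA_eq_bucket1, filterA_eq_bucket2]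
  have e0 : List.countP p0 (bucket p0 xs ++ bucket p1 xs ++ bucket p2 xs) =
      (bucket p0 xs).length := by
    simp only [List.countP_append]
    rw [List.countP_eq_length.mpr (fun z hz => hp0' z (mem_bucket_rank hp0 z hz)),
      List.countP_eq_zero.mpr (fun z hz => by simp [p0, mem_bucket_rank hp1 z hz]),
      List.countP_eq_zero.mpr (fun z hz => by simp [p0, mem_bucket_rank hp2 z hz])]
    omega
  have e1 : List.countP p1 (bucket p0 xs ++ bucket p1 xs ++ bucket p2 xs) =
      (bucket p1 xs).length := by
    simp only [List.countP_append]
    rw [List.countP_eq_length.mpr (fun z hz => hp1' z (mem_bucket_rank hp1 z hz)),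
      List.countP_eq_zero.mpr (fun z hz => by simp [p1, mem_bucket_rank hp0 z hz]),
      List.countP_eq_zero.mpr (fun z hz => by simp [p1, mem_bucket_rank hp2 z hz])]
    omega
  rw [e0, e1, slice3_1, slice3_2, slice3_3]

-- ===== VERDICT (by name: the statement is the Claim_ definition above) =====
theorem group_scene_categories_py_spec : Claim_equal_group_scene_categories_py := by
  intro xs _
  exact main_eq xs
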